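-- pv_equiv track=rewrite | github.com/ciphercirclex/cipher-server-2 | mt5accounttrades.py | parse_contract_data
-- ===== SOURCE A (Python) =====
-- from typing import List, Dict, Optional
--
-- MARKET_MAPPINGS = {
--     'volatility10index': 'Volatility 10 Index',
--     'volatility25index': 'Volatility 25 Index',
--     'volatility50index': 'Volatility 50 Index',
--     'volatility75index': 'Volatility 75 Index',
--     'volatility100index': 'Volatility 100 Index',
--     'driftswitchindex10': 'Drift Switch Index 10',
--     'driftswitchindex20': 'Drift Switch Index 20',
--     'driftswitchindex30': 'Drift Switch Index 30',
--     'multistep2index': 'Multi Step 2 Index',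
--     'multistep4index': 'Multi Step 4 Index',
--     'stepindex': 'Step Index',
--     'usdjpy': 'USDJPY',
--     'usdcad': 'USDCAD',
--     'usdchf': 'USDCHF',
--     'eurusd': 'EURUSD',
--     'gbpusd': 'GBPUSD',
--     'audusd': 'AUDUSD',
--     'nzdusd': 'NZDUSD',
--     'xauusd': 'XAUUSD',
--     'ustech100': 'US Tech 100',
--     'wallstreet30': 'Wall Street 30',
--     'audjpy': 'AUDJPY',
--     'audnzd': 'AUDNZD',
--     'eurchf': 'EURCHF',
--     'eurgbp': 'EURGBP',
--     'eurjpy': 'EURJPY',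
--     'gbpjpy': 'GBPJPY'
-- }
--
-- def parse_contract_data(contract: str) -> Dict[str, str]:
--     """Parse contract data string into structured fields."""
--     if not contract:
--         return {
--             'marketName': 'N/A',
--             'contractType': 'N/A',
--             'timeframe': 'N/A',
--             'entryPrice': 'N/A',
--             'exitPrice': 'N/A',
--             'exitLimitPrice': 'N/A'
--         }
--     parts = contract.split(', ')
--     parsed = {
--         'marketName': 'N/A',
--         'contractType': 'N/A',
--         'timeframe': 'N/A',
--         'entryPrice': 'N/A',
--         'exitPrice': 'N/A',
--         'exitLimitPrice': 'N/A'
--     }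
--     for part in parts:
--         if part.startswith('contract type: '):
--             parsed['contractType'] = part.replace('contract type: ', '')
--         elif part.startswith('market name: '):
--             raw_market = part.replace('market name: ', '').lower()
--             parsed['marketName'] = MARKET_MAPPINGS.get(raw_market, raw_market)
--         elif part.startswith('timeframe: '):
--             parsed['timeframe'] = part.replace('timeframe: ', '')
--         elif part.startswith('entry price: '):
--             parsed['entryPrice'] = part.replace('entry price: ', '')
--         elif part.startswith('exit price: '):
--             parsed['exitPrice'] = part.replace('exit price: ', '')
--         elif part.startswith('exit-limit price: '):
--             parsed['exitLimitPrice'] = part.replace('exit-limit price: ', '')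
--     return parsed
-- ===== SOURCE B (Python) =====
-- MARKET_MAPPINGS = {
--     'volatility10index': 'Volatility 10 Index',
--     'volatility25index': 'Volatility 25 Index',
--     'volatility50index': 'Volatility 50 Index',
--     'volatility75index': 'Volatility 75 Index',
--     'volatility100index': 'Volatility 100 Index',
--     'driftswitchindex10': 'Drift Switch Index 10',
--     'driftswitchindex20': 'Drift Switch Index 20',
--     'driftswitchindex30': 'Drift Switch Index 30',
--     'multistep2index': 'Multi Step 2 Index',
--     'multistep4index': 'Multi Step 4 Index',
--     'stepindex': 'Step Index',
--     'usdjpy': 'USDJPY',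
--     'usdcad': 'USDCAD',
--     'usdchf': 'USDCHF',
--     'eurusd': 'EURUSD',
--     'gbpusd': 'GBPUSD',
--     'audusd': 'AUDUSD',
--     'nzdusd': 'NZDUSD',
--     'xauusd': 'XAUUSD',
--     'ustech100': 'US Tech 100',
--     'wallstreet30': 'Wall Street 30',
--     'audjpy': 'AUDJPY',
--     'audnzd': 'AUDNZD',
--     'eurchf': 'EURCHF',
--     'eurgbp': 'EURGBP',
--     'eurjpy': 'EURJPY',
--     'gbpjpy': 'GBPJPY'
-- }
--
-- FIELDS = [
--     ('marketName', 'market name: '),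
--     ('contractType', 'contract type: '),
--     ('timeframe', 'timeframe: '),
--     ('entryPrice', 'entry price: '),
--     ('exitPrice', 'exit price: '),
--     ('exitLimitPrice', 'exit-limit price: '),
-- ]
--
-- def _last_value(parts, prefix):
--     """Value of the last part carrying this label, with every copy of the label stripped."""
--     for part in reversed(parts):
--         if part.startswith(prefix):
--             return part.replace(prefix, '')
--     return None
--
-- def parse_contract_data(contract: str):
--     """Parse contract data string into structured fields."""
--     parts = contract.split(', ')
--     result = {}
--     for key, prefix in FIELDS:
--         raw = _last_value(parts, prefix)
--         if raw is None:
--             value = 'N/A'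
--         elif key == 'marketName':
--             m = raw.lower()
--             value = MARKET_MAPPINGS.get(m, m)
--         else:
--             value = raw
--         result[key] = value
--     return result
-- ===== Notes on version B (the rewrite author's own statement) =====
-- stated objective: alternative
-- what changed: B inverts the loop structure: instead of A's single pass over the comma-split parts with a six-way elif chain mutating a preinitialised dict, B computes each of the six output fields independently by scanning the parts in reverse for the last part carrying that field's label (early-return helper), applying the market-name mapping only when projecting that field; A's empty-string guard is dropped because splitting an empty contract yields no labelled part, so every field defaults anyway.
import Mathlib
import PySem

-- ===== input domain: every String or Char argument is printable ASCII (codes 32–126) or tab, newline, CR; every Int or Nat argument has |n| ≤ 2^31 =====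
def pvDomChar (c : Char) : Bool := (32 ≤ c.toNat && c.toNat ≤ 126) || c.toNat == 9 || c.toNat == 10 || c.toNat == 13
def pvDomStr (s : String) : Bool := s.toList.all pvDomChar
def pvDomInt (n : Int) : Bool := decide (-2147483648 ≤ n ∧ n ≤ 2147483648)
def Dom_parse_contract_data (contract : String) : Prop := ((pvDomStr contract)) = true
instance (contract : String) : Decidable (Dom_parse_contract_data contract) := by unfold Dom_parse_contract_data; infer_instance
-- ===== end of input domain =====

-- B inverts the loop: instead of A's single pass over the parts with a six-way elif chain,
-- B computes each of the six fields independently by scanning the parts in reverse for the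
-- last one carrying its label (objective: alternative decomposition, same cost).

-- ===== PORT A =====
def MARKET_MAPPINGS : PySem.Dict String String := PySem.Dict.ofList [
  ("volatility10index", "Volatility 10 Index"),
  ("volatility25index", "Volatility 25 Index"),
  ("volatility50index", "Volatility 50 Index"),
  ("volatility75index", "Volatility 75 Index"),
  ("volatility100index", "Volatility 100 Index"),
  ("driftswitchindex10", "Drift Switch Index 10"),
  ("driftswitchindex20", "Drift Switch Index 20"),
  ("driftswitchindex30", "Drift Switch Index 30"),
  ("multistep2index", "Multi Step 2 Index"),
  ("multistep4index", "Multi Step 4 Index"),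
  ("stepindex", "Step Index"),
  ("usdjpy", "USDJPY"),
  ("usdcad", "USDCAD"),
  ("usdchf", "USDCHF"),
  ("eurusd", "EURUSD"),
  ("gbpusd", "GBPUSD"),
  ("audusd", "AUDUSD"),
  ("nzdusd", "NZDUSD"),
  ("xauusd", "XAUUSD"),
  ("ustech100", "US Tech 100"),
  ("wallstreet30", "Wall Street 30"),
  ("audjpy", "AUDJPY"),
  ("audnzd", "AUDNZD"),
  ("eurchf", "EURCHF"),
  ("eurgbp", "EURGBP"),
  ("eurjpy", "EURJPY"),
  ("gbpjpy", "GBPJPY")]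

-- the six label prefixes, as Python string literals
def pcdMN : List Char := "market name: ".toList
def pcdCT : List Char := "contract type: ".toList
def pcdTF : List Char := "timeframe: ".toList
def pcdEN : List Char := "entry price: ".toList
def pcdEX : List Char := "exit price: ".toList
def pcdXL : List Char := "exit-limit price: ".toList

def pcdDefaults : PySem.Dict String String := PySem.Dict.ofList [
  ("marketName", "N/A"), ("contractType", "N/A"), ("timeframe", "N/A"),
  ("entryPrice", "N/A"), ("exitPrice", "N/A"), ("exitLimitPrice", "N/A")]

-- one iteration of A's `for part in parts` loop (strings handled as List Char via PySem.Chars)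
def pcdStepA (parsed : PySem.Dict String String) (part : List Char) : PySem.Dict String String :=
  if PySem.Chars.startswith part pcdCT then
    parsed.insert "contractType" (String.ofList (PySem.Chars.replace part pcdCT []))
  else if PySem.Chars.startswith part pcdMN then
    let raw_market := String.ofList (PySem.Chars.lower (PySem.Chars.replace part pcdMN []))
    parsed.insert "marketName" (MARKET_MAPPINGS.getD raw_market raw_market)
  else if PySem.Chars.startswith part pcdTF then
    parsed.insert "timeframe" (String.ofList (PySem.Chars.replace part pcdTF []))
  else if PySem.Chars.startswith part pcdEN then
    parsed.insert "entryPrice" (String.ofList (PySem.Chars.replace part pcdEN []))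
  else if PySem.Chars.startswith part pcdEX then
    parsed.insert "exitPrice" (String.ofList (PySem.Chars.replace part pcdEX []))
  else if PySem.Chars.startswith part pcdXL then
    parsed.insert "exitLimitPrice" (String.ofList (PySem.Chars.replace part pcdXL []))
  else parsed

def parse_contract_data (contract : String) : List (String × String) :=
  if contract = "" then pcdDefaults.items
  else ((PySem.Chars.splitOn contract.toList (", ".toList)).foldl pcdStepA pcdDefaults).items

-- ===== PORT B =====
def pcdFields : List (String × List Char) := [
  ("marketName", pcdMN),
  ("contractType", pcdCT),
  ("timeframe", pcdTF),
  ("entryPrice", pcdEN),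
  ("exitPrice", pcdEX),
  ("exitLimitPrice", pcdXL)]

-- B's `_last_value` loop over reversed(parts), with early return on the first match
def pcdLastValue : List (List Char) → List Char → Option (List Char)
  | [], _ => none
  | p :: rest, pref =>
      if PySem.Chars.startswith p pref then some (PySem.Chars.replace p pref []) else pcdLastValue rest pref

def parse_contract_data_alt (contract : String) : List (String × String) :=
  let parts := PySem.Chars.splitOn contract.toList (", ".toList)
  (pcdFields.foldl (fun result kp =>
      result.insert kp.1
        (match pcdLastValue parts.reverse kp.2 with
         | none => "N/A"
         | some raw =>
             if kp.1 = "marketName" then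
               let m := String.ofList (PySem.Chars.lower raw)
               MARKET_MAPPINGS.getD m m
             else String.ofList raw))
    PySem.Dict.empty).items

-- ===== PRECONDITION & SPEC =====
def Spec_parse_contract_data (contract : String) (out : List (String × String)) : Prop := out = parse_contract_data_alt contract
instance (contract : String) (out : List (String × String)) : Decidable (Spec_parse_contract_data contract out) := by unfold Spec_parse_contract_data; infer_instance

-- ===== CLAIM (what is proved, stated in full; the proofs are below) =====
def Claim_equal_parse_contract_data : Prop := ∀ (contract : String), Dom_parse_contract_data contract → Spec_parse_contract_data contract (parse_contract_data contract)

-- ===== LEMMAS AND PROOFS =====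

-- the value B assigns to one field
def pcdValue (parts : List (List Char)) (key : String) (pref : List Char) : String :=
  match pcdLastValue parts.reverse pref with
  | none => "N/A"
  | some raw =>
      if key = "marketName" then
        let m := String.ofList (PySem.Chars.lower raw)
        MARKET_MAPPINGS.getD m m
      else String.ofList raw

-- the six-field row both programs end up producing
def pcdRow (parts : List (List Char)) : List (String × String) :=
  [("marketName", pcdValue parts "marketName" pcdMN),
   ("contractType", pcdValue parts "contractType" pcdCT),
   ("timeframe", pcdValue parts "timeframe" pcdTF),
   ("entryPrice", pcdValue parts "entryPrice" pcdEN),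
   ("exitPrice", pcdValue parts "exitPrice" pcdEX),
   ("exitLimitPrice", pcdValue parts "exitLimitPrice" pcdXL)]

lemma pcd_sw_excl {p a b : List Char} (hna : ¬ a <+: b) (hnb : ¬ b <+: a)
    (ha : PySem.Chars.startswith p a = true) : PySem.Chars.startswith p b = false := by
  rw [PySem.Chars.startswith_iff] at ha
  by_contra h
  rw [Bool.not_eq_false, PySem.Chars.startswith_iff] at h
  rcases le_total a.length b.length with hl | hl
  · exact hna (List.prefix_of_prefix_length_le ha h hl)
  · exact hnb (List.prefix_of_prefix_length_le h ha hl)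

lemma pcd_step_row (ps : List (List Char)) (p : List Char) :
    pcdStepA (PySem.Dict.mk (pcdRow ps)) p = PySem.Dict.mk (pcdRow (ps ++ [p])) := by
  by_cases h1 : PySem.Chars.startswith p pcdCT = true
  · simp [pcdStepA, pcdRow, pcdValue, pcdLastValue, PySem.Dict.insert, h1, (pcd_sw_excl (by decide) (by decide) h1 : PySem.Chars.startswith p pcdMN = false), (pcd_sw_excl (by decide) (by decide) h1 : PySem.Chars.startswith p pcdTF = false), (pcd_sw_excl (by decide) (by decide) h1 : PySem.Chars.startswith p pcdEN = false), (pcd_sw_excl (by decide) (by decide) h1 : PySem.Chars.startswith p pcdEX = false), (pcd_sw_excl (by decide) (by decide) h1 : PySem.Chars.startswith p pcdXL = false)]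
  by_cases h2 : PySem.Chars.startswith p pcdMN = true
  · simp [pcdStepA, pcdRow, pcdValue, pcdLastValue, PySem.Dict.insert, h2, h1, (pcd_sw_excl (by decide) (by decide) h2 : PySem.Chars.startswith p pcdTF = false), (pcd_sw_excl (by decide) (by decide) h2 : PySem.Chars.startswith p pcdEN = false), (pcd_sw_excl (by decide) (by decide) h2 : PySem.Chars.startswith p pcdEX = false), (pcd_sw_excl (by decide) (by decide) h2 : PySem.Chars.startswith p pcdXL = false)]
  by_cases h3 : PySem.Chars.startswith p pcdTF = true
  · simp [pcdStepA, pcdRow, pcdValue, pcdLastValue, PySem.Dict.insert, h3, h1, h2, (pcd_sw_excl (by decide) (by decide) h3 : PySem.Chars.startswith p pcdEN = false), (pcd_sw_excl (by decide) (by decide) h3 : PySem.Chars.startswith p pcdEX = false), (pcd_sw_excl (by decide) (by decide) h3 : PySem.Chars.startswith p pcdXL = false)]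
  by_cases h4 : PySem.Chars.startswith p pcdEN = true
  · simp [pcdStepA, pcdRow, pcdValue, pcdLastValue, PySem.Dict.insert, h4, h1, h2, h3, (pcd_sw_excl (by decide) (by decide) h4 : PySem.Chars.startswith p pcdEX = false), (pcd_sw_excl (by decide) (by decide) h4 : PySem.Chars.startswith p pcdXL = false)]
  by_cases h5 : PySem.Chars.startswith p pcdEX = true
  · simp [pcdStepA, pcdRow, pcdValue, pcdLastValue, PySem.Dict.insert, h5, h1, h2, h3, h4, (pcd_sw_excl (by decide) (by decide) h5 : PySem.Chars.startswith p pcdXL = false)]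
  by_cases h6 : PySem.Chars.startswith p pcdXL = true
  · simp [pcdStepA, pcdRow, pcdValue, pcdLastValue, PySem.Dict.insert, h6, h1, h2, h3, h4, h5]
  simp [pcdStepA, pcdRow, pcdValue, pcdLastValue, h1, h2, h3, h4, h5, h6]

lemma pcd_foldA (parts : List (List Char)) :
    parts.foldl pcdStepA pcdDefaults = PySem.Dict.mk (pcdRow parts) := by
  induction parts using List.reverseRecOn with
  | nil => rfl
  | append_singleton ps p ih => rw [List.foldl_append, List.foldl_cons, List.foldl_nil, ih, pcd_step_row]

lemma pcd_alt_eq (contract : String) :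
    parse_contract_data_alt contract =
      pcdRow (PySem.Chars.splitOn contract.toList (", ".toList)) := rfl

-- ===== VERDICT (by name: the statement is the Claim_ definition above) =====
theorem parse_contract_data_spec : Claim_equal_parse_contract_data := by
  intro contract _
  unfold Spec_parse_contract_data parse_contract_data
  rw [pcd_alt_eq]
  by_cases h : contract = ""
  · subst h; decide
  · rw [if_neg h, pcd_foldA]
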